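-- pv_equiv track=rewrite | github.com/GauravS99/answers | q1.py | print_most_repeating
-- ===== SOURCE A (Python) =====
-- def print_most_repeating(s):
--     """
--     Question 1:
--
--     Given a string, print out the character that is repeated the most times consecutively followed by the number of times it appears in the entire string.
--
--     Example:
--     "ssimemoaimmms" should print out the result "m5" (the longest sequence of m's is 3 and there are a total of 5 m's)
--     """
--
--     if len(s) == 0:
--         return ""
--
--     # look up table to maintain counts
--     counts = {}
--     for i in range(26):
--         counts[chr(ord('a') + i)] = 0
--
--     maxi = [s[0], 1]
--     current = [s[0], 0]
--     for char in s:
--         if char == current[0]: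
--             current[1] += 1
--         else:
--             if current[1] > maxi[1]:
--                 maxi[0] = current[0]
--                 maxi[1] = current[1]
--             current[0] = char
--             current[1] = 1
--
--         counts[char] += 1
--
--     # one more check because the longest sequence may be at the very end
--     if current[1] > maxi[1]:
--         maxi[0] = current[0]
--
--     return maxi[0] + str(counts[maxi[0]]) # for two strings, this okay. With more, probably should use join.
-- ===== SOURCE B (Python) =====
-- def print_most_repeating(s):
--     if len(s) == 0:
--         return ""
--
--     # same a-z count table as the task expects (KeyError on other chars)
--     counts = {}
--     for i in range(26):
--         counts[chr(ord('a') + i)] = 0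
--     for ch in s:
--         counts[ch] += 1
--
--     # scan consecutive runs with two indices; earliest strictly-longest run wins
--     best_c, best_l = s[0], 1
--     i, n = 0, len(s)
--     while i < n:
--         j = i
--         while j < n and s[j] == s[i]:
--             j += 1
--         if j - i > best_l:
--             best_c, best_l = s[i], j - i
--         i = j
--
--     return best_c + str(counts[best_c])
-- ===== Notes on version B (the rewrite author's own statement) =====
-- stated objective: alternative
-- what changed: A's single interleaved pass with maxi/current list state and a trailing fix-up check is replaced by a separate counting pass plus a two-index run scan (an inner while advances over each consecutive run) with no trailing check; Pre_ excludes strings containing a non-lowercase-letter character, on which both A and B raise KeyError.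
import Mathlib
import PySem

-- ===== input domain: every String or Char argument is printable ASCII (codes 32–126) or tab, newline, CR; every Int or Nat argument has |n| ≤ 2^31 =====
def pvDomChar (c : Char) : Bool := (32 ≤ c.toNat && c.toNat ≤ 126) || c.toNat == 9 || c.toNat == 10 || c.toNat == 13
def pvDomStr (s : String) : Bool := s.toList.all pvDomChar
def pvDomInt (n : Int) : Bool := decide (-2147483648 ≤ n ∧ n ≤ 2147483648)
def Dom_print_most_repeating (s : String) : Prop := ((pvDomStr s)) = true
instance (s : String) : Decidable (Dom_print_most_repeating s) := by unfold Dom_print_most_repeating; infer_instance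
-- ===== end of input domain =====

-- B replaces A's single interleaved pass (maxi/current state + trailing fix-up) by a counting
-- pass plus a two-index run scan; same cost (objective: alternative).

-- ===== PORT A =====
-- the a..z zero table both Pythons build with the identical 'for i in range(26)' loop
def pmrInitCounts : PySem.Dict Char Int :=
  (PySem.List.pyRange 0 26 1).foldl
    (fun d i => d.insert (Char.ofNat ('a'.toNat + i.toNat)) 0) PySem.Dict.empty

-- A's loop body on the (maxi, current) part of the state
def pmrStepA (st : (Char × Int) × (Char × Int)) (ch : Char) : (Char × Int) × (Char × Int) :=
  if ch == st.2.1 then (st.1, (st.2.1, st.2.2 + 1))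
  else if st.2.2 > st.1.2 then ((st.2.1, st.2.2), (ch, 1))
  else (st.1, (ch, 1))

def print_most_repeating (s : String) : String :=
  let cs := s.toList
  if cs.length = 0 then "" else
    let c0 := PySem.List.pyGetD cs 0 ' '
    -- counts[char] += 1 ported as Dict.modify (exact whenever the key is present, i.e. on Pre_)
    let r := cs.foldl
      (fun st ch => (pmrStepA st.1 ch, st.2.modify ch 0 (fun v => v + 1)))
      (((c0, 1), (c0, 0)), pmrInitCounts)
    let m0 := if r.1.2.2 > r.1.1.2 then r.1.2.1 else r.1.1.1
    String.mk [m0] ++ PySem.Int.toStr (r.2.getD m0 0)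

-- ===== PORT B =====
-- Source B's outer while loop: each step consumes one whole run (the inner 'while s[j] == s[i]')
def pmrRuns : List Char → Char → Int → Char
  | [], bc, _ => bc
  | a :: t, bc, bl =>
    let run := List.takeWhile (fun x => x == a) (a :: t)
    let rest := List.dropWhile (fun x => x == a) (a :: t)
    if (run.length : Int) > bl then pmrRuns rest a (run.length : Int) else pmrRuns rest bc bl
termination_by l _ _ => l.length
decreasing_by
  all_goals
    rw [List.dropWhile_cons_of_pos (by simp)]
    simp only [List.length_cons]
    exact Nat.lt_succ_of_le (List.length_dropWhile_le _ _)

def print_most_repeating_alt (s : String) : String :=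
  let cs := s.toList
  if cs.length = 0 then "" else
    let counts := cs.foldl (fun d ch => d.modify ch 0 (fun v => v + 1)) pmrInitCounts
    let best := pmrRuns cs (PySem.List.pyGetD cs 0 ' ') 1
    String.mk [best] ++ PySem.Int.toStr (counts.getD best 0)

-- ===== PRECONDITION & SPEC =====
-- Pre_ excludes exactly the strings containing a non-lowercase-letter character: Python A raises KeyError there.
def Pre_print_most_repeating (s : String) : Prop :=
  (s.toList.all (fun c => 'a' ≤ c && c ≤ 'z')) = true
instance (s : String) : Decidable (Pre_print_most_repeating s) := by
  unfold Pre_print_most_repeating; infer_instance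
def pvWitness_print_most_repeating : String := "ssimemoaimmms"

def Spec_print_most_repeating (s : String) (out : String) : Prop := out = print_most_repeating_alt s
instance (s : String) (out : String) : Decidable (Spec_print_most_repeating s out) := by unfold Spec_print_most_repeating; infer_instance

-- ===== CLAIM (what is proved, stated in full; the proofs are below) =====
def Claim_equal_print_most_repeating : Prop := ∀ (s : String), Dom_print_most_repeating s → Pre_print_most_repeating s → Spec_print_most_repeating s (print_most_repeating s)

-- ===== LEMMAS AND PROOFS =====

-- A's maxi/current loop plus trailing fix-up, written as structural recursion (proof device)
def pmrAux : List Char → Char → Int → Char → Int → Char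
  | [], m0, m1, c0, c1 => if c1 > m1 then c0 else m0
  | a :: t, m0, m1, c0, c1 =>
    if a == c0 then pmrAux t m0 m1 c0 (c1 + 1)
    else if c1 > m1 then pmrAux t c0 c1 a 1
    else pmrAux t m0 m1 a 1

theorem pmr_foldl_eq_aux (t : List Char) (m0 : Char) (m1 : Int) (c0 : Char) (c1 : Int) :
    (if (List.foldl pmrStepA ((m0, m1), (c0, c1)) t).2.2 > (List.foldl pmrStepA ((m0, m1), (c0, c1)) t).1.2
      then (List.foldl pmrStepA ((m0, m1), (c0, c1)) t).2.1
      else (List.foldl pmrStepA ((m0, m1), (c0, c1)) t).1.1)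
      = pmrAux t m0 m1 c0 c1 := by
  induction t generalizing m0 m1 c0 c1 with
  | nil => simp [pmrAux]
  | cons a t ih =>
    rw [List.foldl_cons]
    by_cases h1 : a = c0
    · subst h1
      rw [show pmrStepA ((m0, m1), (a, c1)) a = ((m0, m1), (a, c1 + 1)) from by simp [pmrStepA]]
      rw [ih]
      simp [pmrAux]
    · by_cases h2 : c1 > m1
      · rw [show pmrStepA ((m0, m1), (c0, c1)) a = ((c0, c1), (a, 1)) from by
            simp [pmrStepA, h1, h2]]
        rw [ih]
        simp [pmrAux, h1, h2]
      · rw [show pmrStepA ((m0, m1), (c0, c1)) a = ((m0, m1), (a, 1)) from by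
            simp [pmrStepA, h1, h2]]
        rw [ih]
        simp [pmrAux, h1, h2]

theorem pmr_takeWhile_rep (n : Nat) (c : Char) (l : List Char) :
    (List.replicate n c ++ l).takeWhile (fun x => x == c)
      = List.replicate n c ++ l.takeWhile (fun x => x == c) := by
  induction n with
  | zero => simp
  | succ k ih => simp [List.replicate_succ, List.takeWhile_cons, ih]

theorem pmr_dropWhile_rep (n : Nat) (c : Char) (l : List Char) :
    (List.replicate n c ++ l).dropWhile (fun x => x == c)
      = l.dropWhile (fun x => x == c) := by
  induction n with
  | zero => simp
  | succ k ih => simp [List.replicate_succ, List.dropWhile_cons, ih]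

theorem pmr_aux_eq_runs (t : List Char) (m0 : Char) (m1 : Int) (c0 : Char) (n : Nat)
    (hn : 1 ≤ n) :
    pmrAux t m0 m1 c0 (n : Int) = pmrRuns (List.replicate n c0 ++ t) m0 m1 := by
  induction t generalizing m0 m1 c0 n with
  | nil =>
    obtain ⟨k, rfl⟩ : ∃ k, n = k + 1 := ⟨n - 1, by omega⟩
    have hnil : ∀ (bc : Char) (bl : Int), pmrRuns [] bc bl = bc := by
      intro bc bl; simp only [pmrRuns]
    have htw : List.takeWhile (fun x => x == c0) (c0 :: List.replicate k c0)
        = List.replicate (k + 1) c0 := by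
      simpa [List.replicate_succ] using pmr_takeWhile_rep (k + 1) c0 []
    have hdw : List.dropWhile (fun x => x == c0) (c0 :: List.replicate k c0)
        = ([] : List Char) := by
      simpa [List.replicate_succ] using pmr_dropWhile_rep (k + 1) c0 []
    rw [List.append_nil, List.replicate_succ]
    simp only [pmrRuns]
    simp only [htw, hdw, List.length_replicate, hnil, pmrAux]
  | cons a t ih =>
    by_cases h : a = c0
    · subst h
      have hlist : List.replicate n a ++ a :: t = List.replicate (n + 1) a ++ t := by
        rw [List.replicate_succ']; simp
      have hstep : pmrAux (a :: t) m0 m1 a (n : Int) = pmrAux t m0 m1 a ((n : Int) + 1) := by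
        simp [pmrAux]
      rw [hlist, ← ih m0 m1 a (n + 1) (by omega), hstep,
        show ((n : Int) + 1) = ((n + 1 : Nat) : Int) from by push_cast; ring]
    · obtain ⟨k, rfl⟩ : ∃ k, n = k + 1 := ⟨n - 1, by omega⟩
      have hbeq : (a == c0) = false := by simp [h]
      have h1 : ∀ (mc0 : Char) (mc1 : Int), pmrAux t mc0 mc1 a 1 = pmrRuns (a :: t) mc0 mc1 := by
        intro mc0 mc1
        simpa using ih mc0 mc1 a 1 le_rfl
      have htw : List.takeWhile (fun x => x == c0) (c0 :: (List.replicate k c0 ++ a :: t))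
          = List.replicate (k + 1) c0 := by
        simpa [List.replicate_succ, List.takeWhile_cons, hbeq] using
          pmr_takeWhile_rep (k + 1) c0 (a :: t)
      have hdw : List.dropWhile (fun x => x == c0) (c0 :: (List.replicate k c0 ++ a :: t))
          = a :: t := by
        simpa [List.replicate_succ, List.dropWhile_cons, hbeq] using
          pmr_dropWhile_rep (k + 1) c0 (a :: t)
      rw [List.replicate_succ, List.cons_append]
      simp only [pmrRuns]
      simp only [htw, hdw, List.length_replicate, pmrAux, hbeq, Bool.false_eq_true, if_false, h1]

-- ===== VERDICT (by name: the statement is the Claim_ definition above) =====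
theorem print_most_repeating_spec : Claim_equal_print_most_repeating := by
  intro s _ _
  unfold Spec_print_most_repeating print_most_repeating print_most_repeating_alt
  cases hcs : s.toList with
  | nil => simp
  | cons a t =>
    have hsplit :
        List.foldl (fun st ch => (pmrStepA st.1 ch, st.2.modify ch 0 (fun v => v + 1)))
          (((PySem.List.pyGetD (a :: t) 0 ' ', 1), (PySem.List.pyGetD (a :: t) 0 ' ', 0)),
            pmrInitCounts) (a :: t)
          = (List.foldl pmrStepA
              ((PySem.List.pyGetD (a :: t) 0 ' ', 1), (PySem.List.pyGetD (a :: t) 0 ' ', 0))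
              (a :: t),
             List.foldl (fun d ch => d.modify ch 0 (fun v => v + 1)) pmrInitCounts (a :: t)) :=
      PySem.List.foldl_prod_mk pmrStepA (fun (d : PySem.Dict Char Int) (ch : Char) => d.modify ch 0 (fun v => v + 1)) (a :: t) _ _
    have hne : ¬((a :: t).length = 0) := by simp
    dsimp only
    rw [if_neg hne, if_neg hne, hsplit]
    dsimp only
    simp only [PySem.List.pyGetD_zero_cons]
    rw [pmr_foldl_eq_aux]
    rw [show pmrAux (a :: t) a 1 a 0 = pmrAux t a 1 a 1 from by simp [pmrAux]]
    rw [show pmrAux t a 1 a 1 = pmrRuns (a :: t) a 1 from by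
      simpa using pmr_aux_eq_runs t a 1 a 1 le_rfl]
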